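-- pv_equiv track=rewrite | github.com/JsquareNG/Go-Getters | src/backend/services/id_verification/extractors/nric_extractor.py | _get_line_after_label
-- ===== SOURCE A (Python) =====
-- def _get_line_after_label(raw: str, label: str, lookahead: int = 6) -> str:
--     lines = [l.strip() for l in raw.split("\n")]
--     for i, line in enumerate(lines):
--         if line.lower() == label.lower():
--             for j in range(i + 1, min(i + lookahead, len(lines))):
--                 if lines[j].strip():
--                     return lines[j].strip()
--     return ""
-- ===== SOURCE B (Python) =====
-- def _get_line_after_label(raw: str, label: str, lookahead: int = 6) -> str:
--     # Single pass with a countdown of how many lines remain inside the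
--     # current label's lookahead window.
--     target = label.lower()
--     remaining = 0
--     for line in (l.strip() for l in raw.split("\n")):
--         if remaining > 0:
--             if line:
--                 return line
--             remaining -= 1
--         if line.lower() == target:
--             remaining = lookahead - 1
--     return ""
-- ===== Notes on version B (the rewrite author's own statement) =====
-- stated objective: alternative
-- what changed: Replaces the outer label-scan with a nested indexed window loop by a single linear pass that maintains a countdown of lines left in the current lookahead window, removing the index arithmetic and the inner rescan.
import Mathlib
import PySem

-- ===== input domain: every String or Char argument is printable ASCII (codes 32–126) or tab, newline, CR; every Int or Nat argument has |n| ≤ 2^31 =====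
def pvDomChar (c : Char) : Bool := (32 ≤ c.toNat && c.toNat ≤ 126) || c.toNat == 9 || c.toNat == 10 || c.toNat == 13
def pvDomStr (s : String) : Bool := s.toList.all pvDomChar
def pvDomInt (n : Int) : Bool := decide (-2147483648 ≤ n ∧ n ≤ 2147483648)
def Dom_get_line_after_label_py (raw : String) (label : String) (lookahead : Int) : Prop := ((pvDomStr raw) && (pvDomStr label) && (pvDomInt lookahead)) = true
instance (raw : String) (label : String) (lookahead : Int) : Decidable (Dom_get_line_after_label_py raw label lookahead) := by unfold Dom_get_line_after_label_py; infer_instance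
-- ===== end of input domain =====

-- B replaces A's label-scan-plus-inner-window loop by one linear pass with a countdown
-- of lines left in the current lookahead window (objective: alternative decomposition).

-- ===== PORT A =====
-- inner loop: 'for j in range(i+1, min(i+lookahead, len(lines))): if lines[j].strip(): return lines[j].strip()'
def pvAInner (lines : List String) (js : List Int) : Option String :=
  match js with
  | [] => none
  | j :: rest =>
    let s := PySem.Str.strip ((PySem.List.pyGet? lines j).getD "")
    if s ≠ "" then some s else pvAInner lines rest

-- outer loop: 'for i, line in enumerate(lines): if line.lower() == label.lower(): …'
def pvAOuter (lines : List String) (label : String) (lookahead : Int) : List (Int × String) → String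
  | [] => ""
  | (i, line) :: rest =>
    if PySem.Str.lower line = PySem.Str.lower label then
      match pvAInner lines (PySem.List.pyRange (i + 1) (min (i + lookahead) (lines.length : Int)) 1) with
      | some s => s
      | none => pvAOuter lines label lookahead rest
    else pvAOuter lines label lookahead rest

def get_line_after_label_py (raw : String) (label : String) (lookahead : Int) : String :=
  let lines := ((PySem.Str.split? raw "\n").getD []).map PySem.Str.strip
  pvAOuter lines label lookahead (PySem.List.enumerate lines 0)

-- ===== PORT B =====
def pvBLoop (target : String) (lookahead : Int) (remaining : Int) : List String → String
  | [] => ""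
  | line :: rest =>
    if remaining > 0 then
      if line ≠ "" then line
      else pvBLoop target lookahead
        (if PySem.Str.lower line = target then lookahead - 1 else remaining - 1) rest
    else pvBLoop target lookahead
      (if PySem.Str.lower line = target then lookahead - 1 else remaining) rest

def get_line_after_label_py_alt (raw : String) (label : String) (lookahead : Int) : String :=
  pvBLoop (PySem.Str.lower label) lookahead 0 (((PySem.Str.split? raw "\n").getD []).map PySem.Str.strip)

-- ===== PRECONDITION & SPEC =====
def Spec_get_line_after_label_py (raw : String) (label : String) (lookahead : Int) (out : String) : Prop := out = get_line_after_label_py_alt raw label lookahead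
instance (raw : String) (label : String) (lookahead : Int) (out : String) : Decidable (Spec_get_line_after_label_py raw label lookahead out) := by unfold Spec_get_line_after_label_py; infer_instance

-- ===== CLAIM (what is proved, stated in full; the proofs are below) =====
def Claim_equal_get_line_after_label_py : Prop := ∀ (raw : String) (label : String) (lookahead : Int), Dom_get_line_after_label_py raw label lookahead → Spec_get_line_after_label_py raw label lookahead (get_line_after_label_py raw label lookahead)

-- ===== LEMMAS AND PROOFS =====

-- common abstraction of both programs: first non-empty line in the (lookahead-1)-window
-- after the first matching label line that has one
def pvFA (target : String) (lookahead : Int) : List String → String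
  | [] => ""
  | x :: rest =>
    if PySem.Str.lower x = target then
      match (rest.take (lookahead - 1).toNat).find? (fun s => s != "") with
      | some v => v
      | none => pvFA target lookahead rest
    else pvFA target lookahead rest

theorem pv_dropWhile_idem {α : Type} (p : α → Bool) (l : List α) :
    List.dropWhile p (List.dropWhile p l) = List.dropWhile p l := by
  induction l with
  | nil => simp
  | cons a l ih =>
    by_cases h : p a = true
    · simp [h, ih]
    · simp [h]

theorem pv_dropWhile_prefix_invariant {α : Type} (p : α → Bool) (l t : List α)
    (hpref : t <+: List.dropWhile p l) : List.dropWhile p t = t := by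
  induction l with
  | nil =>
    simp only [List.dropWhile_nil, List.prefix_nil] at hpref
    simp [hpref]
  | cons a l ih =>
    by_cases hpa : p a = true
    · rw [List.dropWhile_cons, if_pos hpa] at hpref
      exact ih hpref
    · rw [List.dropWhile_cons, if_neg hpa] at hpref
      cases t with
      | nil => simp
      | cons h tl =>
        obtain ⟨u, hu⟩ := hpref
        have hha : h = a := by
          have := congrArg (fun xs => List.head? xs) hu
          simpa using this
        subst hha
        simp [hpa]

-- stripping a stripped line is a no-op (A's inner loop strips already-stripped lines)
theorem pv_strip_idem (s : String) :
    PySem.Str.strip (PySem.Str.strip s) = PySem.Str.strip s := by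
  rw [← String.toList_inj]
  simp only [PySem.Str.toList_strip]
  generalize s.toList = l
  have hpref : (List.dropWhile PySem.Chars.isspace
      (List.dropWhile PySem.Chars.isspace l).reverse).reverse
      <+: List.dropWhile PySem.Chars.isspace l := by
    have hsuf := List.dropWhile_suffix (l := (List.dropWhile PySem.Chars.isspace l).reverse)
      PySem.Chars.isspace
    exact List.reverse_suffix.mp (by simpa using hsuf)
  have h1 := pv_dropWhile_prefix_invariant PySem.Chars.isspace l
    ((List.dropWhile PySem.Chars.isspace
      (List.dropWhile PySem.Chars.isspace l).reverse).reverse)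
    hpref
  simp only [PySem.Chars.strip, PySem.Chars.lstrip, PySem.Chars.rstrip]
  rw [h1, List.reverse_reverse, pv_dropWhile_idem]

theorem pvAInner_eq_find (L : List String) (hL : ∀ x ∈ L, PySem.Str.strip x = x) :
    ∀ (n : Nat) (a c : Int), 0 ≤ a → c ≤ (L.length : Int) → (c - a).toNat = n →
    pvAInner L (PySem.List.pyRange a c 1)
      = ((L.drop a.toNat).take (c - a).toNat).find? (fun s => s != "") := by
  intro n
  induction n with
  | zero =>
    intro a c h0 hc hn
    rw [PySem.List.pyRange_one_eq_nil (by omega)]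
    have h0' : (c - a).toNat = 0 := hn
    simp [pvAInner, h0']
  | succ n ih =>
    intro a c h0 hc hn
    have hac : a < c := by omega
    rw [PySem.List.pyRange_one_cons hac]
    have halen : a < (L.length : Int) := by omega
    have hanat : a.toNat < L.length := by omega
    have hget := PySem.List.pyGet?_eq_some_getElem L h0 halen
    have hstrip := hL _ (List.getElem_mem hanat)
    simp only [pvAInner, hget, Option.getD_some, hstrip]
    rw [List.drop_eq_getElem_cons hanat, hn, List.take_succ_cons]
    by_cases hne : L[a.toNat] = ""
    · rw [if_neg (by simpa using hne), List.find?_cons_of_neg (by simpa using hne)]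
      have hstep := ih (a + 1) c (by omega) hc (by omega)
      have ht1 : (a + 1).toNat = a.toNat + 1 := by omega
      have ht2 : (c - (a + 1)).toNat = n := by omega
      rw [hstep, ht1, ht2]
    · rw [if_pos hne, List.find?_cons_of_pos (by simpa using hne)]

theorem pvAOuter_eq_fa (L : List String) (hL : ∀ x ∈ L, PySem.Str.strip x = x)
    (label : String) (lookahead : Int) :
    ∀ (s : List String) (k : Nat), L.drop k = s →
    pvAOuter L label lookahead (PySem.List.enumerate s (k : Int))
      = pvFA (PySem.Str.lower label) lookahead s := by
  intro s
  induction s with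
  | nil => intro k hk; simp [PySem.List.enumerate, pvAOuter, pvFA]
  | cons x rest ih =>
    intro k hk
    have hk' : k < L.length := by
      by_contra hcon
      rw [List.drop_eq_nil_of_le (Nat.le_of_not_lt hcon)] at hk
      simp at hk
    have hdrop := List.drop_eq_getElem_cons hk'
    rw [hk] at hdrop
    have hx : x = L[k] := (List.cons.injEq _ _ _ _ ▸ hdrop).1
    have hrest : L.drop (k + 1) = rest := ((List.cons.injEq _ _ _ _ ▸ hdrop).2).symm
    rw [PySem.List.enumerate_cons]
    simp only [pvAOuter, pvFA]
    have hcast : (k : Int) + 1 = ((k + 1 : Nat) : Int) := by push_cast; ring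
    by_cases hlab : PySem.Str.lower x = PySem.Str.lower label
    · rw [if_pos hlab, if_pos hlab]
      have hinner := pvAInner_eq_find L hL
        (min ((k : Int) + lookahead) (L.length : Int) - ((k : Int) + 1)).toNat
        ((k : Int) + 1) (min ((k : Int) + lookahead) (L.length : Int))
        (by omega) (min_le_right _ _) rfl
      have ht1 : ((k : Int) + 1).toNat = k + 1 := by omega
      rw [ht1] at hinner
      rw [hinner, hrest]
      have hlen : rest.length = L.length - (k + 1) := by
        rw [← hrest, List.length_drop]
      have htake : rest.take
          (min ((k : Int) + lookahead) (L.length : Int) - ((k : Int) + 1)).toNat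
          = rest.take (lookahead - 1).toNat := by
        rw [List.take_eq_take_iff]
        omega
      rw [htake]
      cases hfind : (rest.take (lookahead - 1).toNat).find? (fun s => s != "") with
      | some v => simp
      | none =>
        rw [hcast]
        exact ih (k + 1) hrest
    · rw [if_neg hlab, if_neg hlab, hcast]
      exact ih (k + 1) hrest

theorem pvBLoop_eq_fa (target : String) (lookahead : Int) :
    ∀ (s : List String) (r : Int), r ≤ max (lookahead - 1) 0 →
    pvBLoop target lookahead r s
      = (match (s.take r.toNat).find? (fun x => x != "") with
         | some v => v
         | none => pvFA target lookahead s) := by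
  intro s
  induction s with
  | nil => intro r hr; simp [pvBLoop, pvFA]
  | cons line rest ih =>
    intro r hr
    simp only [pvBLoop]
    by_cases hrp : r > 0
    · rw [if_pos hrp]
      have hrt : r.toNat = (r - 1).toNat + 1 := by omega
      rw [hrt, List.take_succ_cons]
      by_cases hline : line = ""
      · subst hline
        rw [if_neg (by simp), List.find?_cons_of_neg (by simp)]
        by_cases hm : PySem.Str.lower "" = target
        · rw [if_pos hm, ih (lookahead - 1) (by omega)]
          simp only [pvFA]
          rw [if_pos hm]
          cases hf : (rest.take (r - 1).toNat).find? (fun x => x != "") with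
          | some v =>
            have hbig : (rest.take (lookahead - 1).toNat).find? (fun x => x != "")
                = some v := by
              have hsplit : rest.take (lookahead - 1).toNat
                  = rest.take (r - 1).toNat ++
                    (rest.drop (r - 1).toNat).take
                      ((lookahead - 1).toNat - (r - 1).toNat) := by
                rw [← List.take_add]
                congr 1
                omega
              rw [hsplit, List.find?_append, hf]
              rfl
            have hbig' : (rest.take (lookahead.toNat - 1)).find? (fun x => x != "")
                = some v := by
              rw [show lookahead.toNat - 1 = (lookahead - 1).toNat from by omega]
              exact hbig
            simp [hbig']
          | none => simp
        · rw [if_neg hm, ih (r - 1) (by omega)]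
          simp only [pvFA]
          rw [if_neg hm]
      · rw [if_pos hline, List.find?_cons_of_pos (by simpa using hline)]
    · rw [if_neg hrp]
      have hr0 : r.toNat = 0 := by omega
      rw [hr0, List.take_zero, List.find?_nil]
      simp only [pvFA]
      by_cases hm : PySem.Str.lower line = target
      · rw [if_pos hm, if_pos hm, ih (lookahead - 1) (by omega)]
      · rw [if_neg hm, if_neg hm, ih r hr, hr0, List.take_zero, List.find?_nil]

-- ===== VERDICT (by name: the statement is the Claim_ definition above) =====
theorem get_line_after_label_py_spec : Claim_equal_get_line_after_label_py := by
  intro raw label lookahead _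
  unfold Spec_get_line_after_label_py get_line_after_label_py get_line_after_label_py_alt
  set L := ((PySem.Str.split? raw "\n").getD []).map PySem.Str.strip with hLdef
  have hL : ∀ x ∈ L, PySem.Str.strip x = x := by
    intro x hx
    rw [hLdef] at hx
    obtain ⟨y, _, rfl⟩ := List.mem_map.mp hx
    exact pv_strip_idem y
  have hA := pvAOuter_eq_fa L hL label lookahead L 0 rfl
  have hB := pvBLoop_eq_fa (PySem.Str.lower label) lookahead L 0 (by simp)
  simp only [Int.toNat_zero, List.take_zero, List.find?_nil] at hB
  rw [hB]; exact_mod_cast hA
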